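-- pv_equiv track=rewrite | github.com/tabidots/aoc2021 | py/day01.py | sum_partitions
-- ===== SOURCE A (Python) =====
-- def sum_partitions(lst, chunk_size, step=-1):
--     start = 0
--     end = chunk_size
--     sums = []
--     if step == -1:
--         step = chunk_size
--     while start <= len(lst):
--         if len(lst[start:end]) < chunk_size:
--             return sums
--         sums.append(sum(lst[start:end]))
--         start += step
--         end = start + chunk_size
-- ===== SOURCE B (Python) =====
-- def sum_partitions(lst, chunk_size, step=-1):
--     if step == -1:
--         step = chunk_size
--     prefix = [0]
--     for x in lst:
--         prefix.append(prefix[-1] + x)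
--     return [prefix[s + chunk_size] - prefix[s]
--             for s in range(0, len(lst) - chunk_size + 1, step)]
-- ===== Notes on version B (the rewrite author's own statement) =====
-- stated objective: alternative
-- what changed: B builds a prefix-sum array once and gets each window sum as one subtraction, instead of A's re-summing a fresh slice for every window (asymptotically fewer additions when chunk_size is large; not measured faster on the generated inputs).
-- outside the precondition, e.g. on sum_partitions([1, 2, 3], 2, -2): A returns [3], B returns []; on sum_partitions([1], 5, 0): A returns [], B raises ValueError
import Mathlib
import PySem

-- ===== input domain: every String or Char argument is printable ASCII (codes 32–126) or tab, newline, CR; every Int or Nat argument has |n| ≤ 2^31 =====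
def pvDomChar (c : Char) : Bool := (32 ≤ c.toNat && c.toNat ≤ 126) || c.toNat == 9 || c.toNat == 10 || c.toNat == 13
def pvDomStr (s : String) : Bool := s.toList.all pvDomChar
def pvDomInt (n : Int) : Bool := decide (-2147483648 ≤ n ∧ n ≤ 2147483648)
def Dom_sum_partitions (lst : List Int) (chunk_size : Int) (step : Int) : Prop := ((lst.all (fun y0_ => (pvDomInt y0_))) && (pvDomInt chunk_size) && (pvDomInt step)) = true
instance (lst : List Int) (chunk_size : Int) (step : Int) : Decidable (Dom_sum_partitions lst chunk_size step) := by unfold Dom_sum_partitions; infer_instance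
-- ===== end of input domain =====

-- B replaces A's per-window slice-and-sum by a prefix-sum array with one subtraction per window
-- (return-value equivalence on Pre_; both versions mutate only locals).

-- ===== PORT A =====
-- A's while loop, step for step; fuel only bounds the iterations (inside Pre_ it never runs out:
-- with step ≥ 1 the loop does at most lst.length + 1 iterations before returning).  When the
-- Python loop falls through (Python returns None, no list), the port stops with the sums so far;
-- those inputs are excluded by Pre_.
def sum_partitions_go (lst : List Int) (chunk_size : Int) (step : Int) :
    Nat → Int → Int → List Int → List Int
  | 0, _, _, sums => sums
  | fuel + 1, start, end_, sums =>
    if start ≤ (lst.length : Int) then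
      let sl := PySem.List.slice lst (some start) (some end_)
      if (sl.length : Int) < chunk_size then sums
      else sum_partitions_go lst chunk_size step fuel (start + step) (start + step + chunk_size)
             (sums ++ [sl.sum])
    else sums

def sum_partitions (lst : List Int) (chunk_size : Int) (step : Int) : List Int :=
  let step' := if step = -1 then chunk_size else step
  sum_partitions_go lst chunk_size step' (lst.length + 2) 0 chunk_size []

-- ===== PORT B =====
-- prefix = [0]; for x in lst: prefix.append(prefix[-1] + x)
def sum_partitions_prefix (lst : List Int) : List Int :=
  lst.foldl (fun p x => p ++ [(PySem.List.pyGet? p (-1)).getD 0 + x]) [0]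

def sum_partitions_alt (lst : List Int) (chunk_size : Int) (step : Int) : List Int :=
  let step' := if step = -1 then chunk_size else step
  let pref := sum_partitions_prefix lst
  (PySem.List.pyRange 0 ((lst.length : Int) - chunk_size + 1) step').map
    (fun s => (PySem.List.pyGet? pref (s + chunk_size)).getD 0 -
              (PySem.List.pyGet? pref s).getD 0)

-- ===== PRECONDITION & SPEC =====
-- Pre_ keeps the natural domain chunk_size ≥ 1 and step ≥ 1 (or the -1 default = chunk_size), and
-- excludes the inputs on which the Python A's while loop falls through and returns None (not a
-- list): that happens exactly when the first window start past the last full window already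
-- exceeds len(lst), i.e. when the arithmetic disjunct below fails.  Non-positive step (other than
-- the -1 default) and non-positive chunk_size make A diverge, return None, or return a value only
-- via negative-slice wraparound outside the task's natural domain; they are excluded too (cites).
def Pre_sum_partitions (lst : List Int) (chunk_size : Int) (step : Int) : Prop :=
  (step = -1 ∨ 1 ≤ step) ∧ 1 ≤ chunk_size ∧
  ((lst.length : Int) < chunk_size ∨
    (if step = -1 then chunk_size else step) ≤
      chunk_size + ((lst.length : Int) - chunk_size) % (if step = -1 then chunk_size else step))
instance (lst : List Int) (chunk_size : Int) (step : Int) : Decidable (Pre_sum_partitions lst chunk_size step) := by unfold Pre_sum_partitions; infer_instance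

def pvWitness_sum_partitions : List Int × Int × Int := ([1, 2, 3, 4, 5], 2, -1)

def Spec_sum_partitions (lst : List Int) (chunk_size : Int) (step : Int) (out : List Int) : Prop := out = sum_partitions_alt lst chunk_size step
instance (lst : List Int) (chunk_size : Int) (step : Int) (out : List Int) : Decidable (Spec_sum_partitions lst chunk_size step out) := by unfold Spec_sum_partitions; infer_instance

-- ===== CLAIM (what is proved, stated in full; the proofs are below) =====
def Claim_equal_sum_partitions : Prop := ∀ (lst : List Int) (chunk_size : Int) (step : Int), Dom_sum_partitions lst chunk_size step → Pre_sum_partitions lst chunk_size step → Spec_sum_partitions lst chunk_size step (sum_partitions lst chunk_size step)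

-- ===== LEMMAS AND PROOFS =====

-- B's foldl builds the list of partial sums of lst (invariant: acc's last element is l)
theorem prefix_aux (xs : List Int) : ∀ (acc : List Int) (l : Int), acc.getLast? = some l →
    xs.foldl (fun p x => p ++ [(PySem.List.pyGet? p (-1)).getD 0 + x]) acc =
      acc ++ (List.range xs.length).map (fun i => l + (xs.take (i+1)).sum) := by
  induction xs with
  | nil => intro acc l h; simp
  | cons x xs ih =>
    intro acc l h
    have hlast : (PySem.List.pyGet? acc (-1)).getD 0 = l := by
      rw [PySem.List.pyGet?_neg_one, h]; rfl
    simp only [List.foldl_cons, hlast]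
    rw [ih (acc ++ [l + x]) (l + x) (by simp [List.getLast?_append])]
    simp only [List.length_cons, List.range_succ_eq_map, List.map_cons, List.map_map]
    simp [Function.comp, List.append_assoc, List.sum_cons, add_assoc]

theorem sum_partitions_prefix_eq (lst : List Int) :
    sum_partitions_prefix lst =
      (List.range (lst.length + 1)).map (fun i => ((lst.take i).sum)) := by
  rw [sum_partitions_prefix, prefix_aux lst [0] 0 rfl]
  simp [List.range_succ_eq_map, Function.comp]

-- a positive-step range is empty / peels off its head
theorem pyRange_pos_nil (a b s : Int) (hs : 0 < s) (hab : b ≤ a) :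
    PySem.List.pyRange a b s = [] := by
  rw [PySem.List.pyRange_of_pos a b hs]
  simp [show ¬ a < b by omega]

theorem pyRange_pos_cons (a b s : Int) (hs : 0 < s) (hab : a < b) :
    PySem.List.pyRange a b s = a :: PySem.List.pyRange (a + s) b s := by
  rw [PySem.List.pyRange_of_pos a b hs, PySem.List.pyRange_of_pos (a + s) b hs]
  have hdiv : (b - a + s - 1) / s = (b - (a + s) + s - 1) / s + 1 := by
    have : b - a + s - 1 = (b - (a + s) + s - 1) + 1 * s := by ring
    rw [this, Int.add_mul_ediv_right _ _ (by omega)]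
  by_cases h2 : a + s < b
  · rw [if_pos hab, if_pos h2, hdiv]
    have hn : ((b - (a + s) + s - 1) / s + 1).toNat = ((b - (a + s) + s - 1) / s).toNat + 1 := by
      have : 0 ≤ (b - (a + s) + s - 1) / s := Int.ediv_nonneg (by omega) (by omega)
      omega
    rw [hn, List.range_succ_eq_map]
    simp [List.map_map, Function.comp]
    intro k _; ring
  · rw [if_pos hab, if_neg h2, hdiv]
    have hz : (b - (a + s) + s - 1) / s = 0 := by
      apply Int.ediv_eq_zero_of_lt <;> omega
    rw [hz]
    simp

-- reading the prefix list at a valid index gives a partial sum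
theorem prefix_get (lst : List Int) (i : Int) (h0 : 0 ≤ i) (h1 : i ≤ (lst.length : Int)) :
    (PySem.List.pyGet? (sum_partitions_prefix lst) i).getD 0 = (lst.take i.toNat).sum := by
  rw [PySem.List.pyGet?_of_nonneg _ h0, sum_partitions_prefix_eq]
  rw [List.getElem?_map, List.getElem?_range (by omega)]
  rfl

-- a window sum is a difference of two prefix sums
theorem window_eq (lst : List Int) (c s : Int) (hc : 0 ≤ c) (hs : 0 ≤ s)
    (h : s + c ≤ (lst.length : Int)) :
    (PySem.List.pyGet? (sum_partitions_prefix lst) (s + c)).getD 0 -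
      (PySem.List.pyGet? (sum_partitions_prefix lst) s).getD 0 =
    (PySem.List.slice lst (some s) (some (s + c))).sum := by
  rw [prefix_get lst (s + c) (by omega) h, prefix_get lst s hs (by omega)]
  rw [PySem.List.slice_of_nonneg lst hs (by omega) (by omega) h]
  have hsc : (s + c).toNat = s.toNat + c.toNat := by omega
  rw [hsc, Nat.add_sub_cancel_left, List.take_add, List.sum_append]
  ring

theorem slice_len (lst : List Int) (s e : Int) (hs : 0 ≤ s) (he : 0 ≤ e) :
    (PySem.List.slice lst (some s) (some e)).length =
      min (e.toNat - s.toNat) (lst.length - s.toNat) := by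
  rw [PySem.List.slice_toNat lst hs he]
  simp [List.length_take, List.length_drop]

-- A's loop, from any window start s, appends exactly B's windows for starts s, s+st, …
theorem go_invariant (lst : List Int) (c st : Int) (hc : 1 ≤ c) (hst : 1 ≤ st) :
    ∀ (fuel : Nat) (s : Int) (sums : List Int), 0 ≤ s →
      (lst.length : Int) + 1 - s < fuel →
      sum_partitions_go lst c st fuel s (s + c) sums =
        sums ++ (PySem.List.pyRange s ((lst.length : Int) - c + 1) st).map
          (fun j => (PySem.List.pyGet? (sum_partitions_prefix lst) (j + c)).getD 0 -
                    (PySem.List.pyGet? (sum_partitions_prefix lst) j).getD 0) := by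
  intro fuel
  induction fuel with
  | zero =>
    intro s sums h0 hf
    rw [sum_partitions_go, pyRange_pos_nil _ _ _ (by omega) (by omega)]
    simp
  | succ f ih =>
    intro s sums h0 hf
    rw [sum_partitions_go]
    by_cases hsn : s ≤ (lst.length : Int)
    · rw [if_pos hsn]
      simp only []
      have hlen := slice_len lst s (s + c) h0 (by omega)
      by_cases hfit : s + c ≤ (lst.length : Int)
      · have hlc : ¬ (((PySem.List.slice lst (some s) (some (s + c))).length : Int) < c) := by
          rw [hlen]; omega
        rw [if_neg hlc]
        rw [ih (s + st) _ (by omega) (by omega)]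
        rw [pyRange_pos_cons s _ st (by omega) (by omega), List.map_cons]
        rw [window_eq lst c s (by omega) h0 hfit]
        simp [List.append_assoc]
      · have hlc : (((PySem.List.slice lst (some s) (some (s + c))).length : Int) < c) := by
          rw [hlen]; omega
        rw [if_pos hlc, pyRange_pos_nil _ _ _ (by omega) (by omega)]
        simp
    · rw [if_neg hsn, pyRange_pos_nil _ _ _ (by omega) (by omega)]
      simp

-- ===== VERDICT (by name: the statement is the Claim_ definition above) =====
theorem sum_partitions_spec : Claim_equal_sum_partitions := by
  intro lst c step _ hpre
  obtain ⟨h1, h2, -⟩ := hpre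
  unfold Spec_sum_partitions sum_partitions sum_partitions_alt
  simp only []
  have hst1 : 1 ≤ (if step = -1 then c else step) := by
    rcases h1 with h | h
    · rw [if_pos h]; exact h2
    · rw [if_neg (by omega)]; exact h
  have h := go_invariant lst c (if step = -1 then c else step) h2 hst1
    (lst.length + 2) 0 [] le_rfl (by push_cast; omega)
  rw [zero_add] at h
  rw [h, List.nil_append]
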